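-- pv_equiv track=rewrite | github.com/Sahithi2696/Sentimental-Analysis-of-Amazon | Scratch files/scratch_25.py | process_review
-- ===== SOURCE A (Python) =====
-- def process_review(review):
--     # Split the review into a list of words
--     words = review.split()
--
--     # Define stop words
--     stop_words = ['the', 'a', 'an', 'in', 'on', 'at', 'to', 'for', 'with', 'by', 'of', 'is', 'are', 'was', 'were']
--
--     # Join words that occur after a full stop to the word before the full stop
--     joined_words = []
--     prev_word = None
--     for word in words:
--         if prev_word and prev_word[-1] == '.':
--             joined_words[-1] += word
--         else:
--             joined_words.append(word)
--         prev_word = word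
--
--     # Remove words less than 3 characters and stop words
--     filtered_words = [word.lower() for word in joined_words if (len(word) >= 3) and (word.lower() not in stop_words)]
--
--     # Count the occurrence of each word
--     word_count = {}
--     for word in filtered_words:
--         if word in word_count:
--             word_count[word] += 1
--         else:
--             word_count[word] = 1
--
--     return word_count
-- ===== SOURCE B (Python) =====
-- def process_review(review):
--     stop_words = {'the', 'a', 'an', 'in', 'on', 'at', 'to', 'for', 'with', 'by', 'of', 'is', 'are', 'was', 'were'}
--     counts = {}
--     tokens = review.split()
--     i, n = 0, len(tokens)
--     while i < n:
--         w = tokens[i]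
--         i += 1
--         while w.endswith('.') and i < n:
--             w += tokens[i]
--             i += 1
--         lw = w.lower()
--         if len(w) >= 3 and lw not in stop_words:
--             counts[lw] = counts.get(lw, 0) + 1
--     return counts
-- ===== Notes on version B (the rewrite author's own statement) =====
-- stated objective: simpler
-- what changed: Replaces A's three sequential passes (stateful prev_word/append-to-last join loop, filter comprehension, membership-tested count loop over an intermediate dict) by a single indexed pass with a nested absorb loop that merges a run of dot-terminated tokens and counts the filtered lowered word immediately via dict.get, with stop words held in a set.
import Mathlib
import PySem

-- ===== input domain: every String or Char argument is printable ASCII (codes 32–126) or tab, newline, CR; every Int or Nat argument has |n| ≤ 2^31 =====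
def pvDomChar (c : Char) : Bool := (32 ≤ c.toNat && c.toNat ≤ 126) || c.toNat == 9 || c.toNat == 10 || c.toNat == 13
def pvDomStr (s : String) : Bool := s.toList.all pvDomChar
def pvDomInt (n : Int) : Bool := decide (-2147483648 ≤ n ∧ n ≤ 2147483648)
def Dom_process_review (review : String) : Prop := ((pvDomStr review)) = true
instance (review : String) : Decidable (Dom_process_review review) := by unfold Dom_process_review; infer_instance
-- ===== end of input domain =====

-- B fuses A's join / filter / count passes into one absorb-and-count pass (same O(n) cost, shorter);
-- both ports work on List Char (PySem.Chars) and return the count dict's items with String keys.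


-- ===== PORT A =====
-- literal transliteration of A: split, stateful prev_word append/merge loop, filter
-- comprehension, then a membership-tested counting loop over a dict.
-- 'prev_word = None' is ported as prev = [] : Python's truthiness test
-- 'prev_word and …' treats None and the empty string identically (both falsy), and
-- split() never yields an empty token, so this is exact.
def process_review (review : String) : List (String × Int) :=
  let words := PySem.Chars.split₀ review.toList
  let stop_words : List (List Char) :=
    ["the".toList, "a".toList, "an".toList, "in".toList, "on".toList, "at".toList,
     "to".toList, "for".toList, "with".toList, "by".toList, "of".toList, "is".toList,
     "are".toList, "was".toList, "were".toList]
  let st := words.foldl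
    (fun (st : List (List Char) × List Char) word =>
      if decide (st.2 ≠ []) && (PySem.List.pyGet? st.2 (-1) == some '.') then
        (st.1.dropLast ++ [st.1.getLastD [] ++ word], word)
      else
        (st.1 ++ [word], word))
    ([], [])
  let joined_words := st.1
  let filtered_words :=
    (joined_words.filter (fun w =>
        decide (3 ≤ w.length) && !(stop_words.contains (PySem.Chars.lower w)))).map
      (fun w => PySem.Chars.lower w)
  let word_count := filtered_words.foldl
    (fun (d : PySem.Dict (List Char) Int) w =>
      if d.contains w then d.modify w 0 (· + 1) else d.insert w 1)
    PySem.Dict.empty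
  word_count.items.map (fun p => (String.ofList p.1, p.2))

-- ===== PORT B =====
-- Source B's inner 'while w.endswith(".") and i < n: w += tokens[i]; i += 1'
def pvAbsorb : List Char → List (List Char) → List Char × List (List Char)
  | w, [] => (w, [])
  | w, t :: ts => if PySem.Chars.endswith w ['.'] then pvAbsorb (w ++ t) ts else (w, t :: ts)

lemma pvAbsorb_length_le (w : List Char) (ts : List (List Char)) :
    (pvAbsorb w ts).2.length ≤ ts.length := by
  induction ts generalizing w with
  | nil => simp [pvAbsorb]
  | cons t ts ih =>
      by_cases h : PySem.Chars.endswith w ['.'] = true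
      · simp only [pvAbsorb, h, if_pos]
        exact (ih _).trans (Nat.le_succ _)
      · simp [pvAbsorb, h]

-- Source B's outer 'while i < n' loop: absorb one merged word, count it if it passes the filter.
def pvCountLoop (stop : PySem.Set (List Char)) (tokens : List (List Char))
    (counts : PySem.Dict (List Char) Int) : PySem.Dict (List Char) Int :=
  match tokens with
  | [] => counts
  | t :: ts =>
    let wr := pvAbsorb t ts
    let lw := PySem.Chars.lower wr.1
    let counts' :=
      if decide (3 ≤ wr.1.length) && !(stop.contains lw) then
        counts.insert lw (counts.getD lw 0 + 1)
      else counts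
    pvCountLoop stop wr.2 counts'
termination_by tokens.length
decreasing_by exact Nat.lt_succ_of_le (pvAbsorb_length_le t ts)

def process_review_alt (review : String) : List (String × Int) :=
  let stop : PySem.Set (List Char) := PySem.Set.ofList
    ["the".toList, "a".toList, "an".toList, "in".toList, "on".toList, "at".toList,
     "to".toList, "for".toList, "with".toList, "by".toList, "of".toList, "is".toList,
     "are".toList, "was".toList, "were".toList]
  let counts := pvCountLoop stop (PySem.Chars.split₀ review.toList) PySem.Dict.empty
  counts.items.map (fun p => (String.ofList p.1, p.2))

-- ===== PRECONDITION & SPEC =====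
def Spec_process_review (review : String) (out : List (String × Int)) : Prop :=
  out = process_review_alt review
instance (review : String) (out : List (String × Int)) : Decidable (Spec_process_review review out) := by
  unfold Spec_process_review; infer_instance

-- ===== CLAIM (what is proved, stated in full; the proofs are below) =====
def Claim_equal_process_review : Prop :=
  ∀ (review : String), Dom_process_review review → Spec_process_review review (process_review review)

-- ===== LEMMAS AND PROOFS =====

-- merged word list produced by repeated absorption (proof-only characterisation)
def pvMerge : List (List Char) → List (List Char)
  | [] => []
  | t :: ts => (pvAbsorb t ts).1 :: pvMerge (pvAbsorb t ts).2
termination_by ts => ts.length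
decreasing_by exact Nat.lt_succ_of_le (pvAbsorb_length_le t ts)

def pvMergeFrom (acc : List Char) (ts : List (List Char)) : List (List Char) :=
  (pvAbsorb acc ts).1 :: pvMerge (pvAbsorb acc ts).2

lemma pvMerge_cons (t : List Char) (ts : List (List Char)) :
    pvMerge (t :: ts) = pvMergeFrom t ts := by
  rw [pvMerge, pvMergeFrom]

lemma pvMergeFrom_absorb (acc t : List Char) (ts : List (List Char))
    (h : PySem.Chars.endswith acc ['.'] = true) :
    pvMergeFrom acc (t :: ts) = pvMergeFrom (acc ++ t) ts := by
  simp [pvMergeFrom, pvAbsorb, h]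

lemma pvMergeFrom_stop (acc t : List Char) (ts : List (List Char))
    (h : PySem.Chars.endswith acc ['.'] = false) :
    pvMergeFrom acc (t :: ts) = acc :: pvMergeFrom t ts := by
  simp [pvMergeFrom, pvAbsorb, h, pvMerge_cons]

-- every token from str.split() is nonempty
lemma pvSplit₀_go_ne_nil (s : List Char) : ∀ (cur : List Char) (acc : List (List Char)),
    (∀ w ∈ acc, w ≠ []) → ∀ w ∈ PySem.Chars.split₀.go s cur acc, w ≠ [] := by
  induction s with
  | nil =>
      intro cur acc hacc w hw
      by_cases hc : cur.isEmpty
      · rw [PySem.Chars.split₀.go, if_pos hc] at hw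
        exact hacc w (List.mem_reverse.mp hw)
      · rw [PySem.Chars.split₀.go, if_neg hc] at hw
        rcases List.mem_cons.mp (List.mem_reverse.mp hw) with rfl | hmem
        · simpa using fun h => hc (by simp [h])
        · exact hacc w hmem
  | cons c rest ih =>
      intro cur acc hacc w hw
      rw [PySem.Chars.split₀.go] at hw
      by_cases hsp : PySem.Chars.isspace c
      · rw [if_pos hsp] at hw
        by_cases hc : cur.isEmpty
        · rw [if_pos hc] at hw
          exact ih [] acc hacc w hw
        · rw [if_neg hc] at hw
          refine ih [] _ ?_ w hw
          intro v hv
          rcases List.mem_cons.mp hv with rfl | hv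
          · simpa using fun h => hc (by simp [h])
          · exact hacc v hv
      · rw [if_neg hsp] at hw
        exact ih (c :: cur) acc hacc w hw

lemma pvSplit₀_ne_nil (s : List Char) : ∀ w ∈ PySem.Chars.split₀ s, w ≠ [] := by
  have := pvSplit₀_go_ne_nil s [] [] (by simp)
  simpa [PySem.Chars.split₀] using this

-- A's truthiness test on the previous raw token equals B's test on the accumulated word
lemma pvCond_bridge (s p : List Char) (hp : p ≠ []) :
    (decide (p ≠ []) && (PySem.List.pyGet? p (-1) == some '.')) =
      PySem.Chars.endswith (s ++ p) ['.'] := by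
  rcases List.eq_nil_or_concat p with rfl | ⟨q, c, rfl⟩
  · exact absurd rfl hp
  · have hL : PySem.List.pyGet? (q.concat c) (-1) = some c := by
      simp [PySem.List.pyGet?, PySem.List.pyIdx?, List.concat_eq_append]
    simp only [List.concat_eq_append] at hL ⊢
    rcases eq_or_ne c '.' with rfl | hne
    · have hR : PySem.Chars.endswith (s ++ (q ++ ['.'])) ['.'] = true :=
        (PySem.Chars.endswith_iff _ _).mpr ⟨s ++ q, by simp⟩
      simp [hL, hR]
    · have hR : PySem.Chars.endswith (s ++ (q ++ [c])) ['.'] = false := by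
        rw [Bool.eq_false_iff]
        intro hEnd
        rcases (PySem.Chars.endswith_iff _ _).mp hEnd with ⟨t, ht⟩
        have h1 : (t ++ ['.']).getLast? = some '.' := List.getLast?_concat
        have h2 : (s ++ (q ++ [c])).getLast? = some c := by
          rw [← List.append_assoc]
          exact List.getLast?_concat
        rw [ht, h2] at h1
        exact hne (Option.some.inj h1)
      simp [hL, hR, hne]

-- A's join loop computes the merged word list
lemma pvFoldA (ts : List (List Char)) : ∀ (pre : List (List Char)) (s p : List Char),
    p ≠ [] → (∀ t ∈ ts, t ≠ []) →
    (ts.foldl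
      (fun (st : List (List Char) × List Char) word =>
        if decide (st.2 ≠ []) && (PySem.List.pyGet? st.2 (-1) == some '.') then
          (st.1.dropLast ++ [st.1.getLastD [] ++ word], word)
        else
          (st.1 ++ [word], word))
      (pre ++ [s ++ p], p)).1 = pre ++ pvMergeFrom (s ++ p) ts := by
  induction ts with
  | nil =>
      intro pre s p hp _
      simp [pvMergeFrom, pvAbsorb, pvMerge]
  | cons t ts ih =>
      intro pre s p hp hts
      have hbridge := pvCond_bridge s p hp
      by_cases hc : PySem.Chars.endswith (s ++ p) ['.'] = true
      · have hA : (decide (p ≠ []) && (PySem.List.pyGet? p (-1) == some '.')) = true := by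
          rw [hbridge]; exact hc
        rw [List.foldl_cons]
        simp only [hA, if_pos, List.dropLast_concat, List.getLastD_concat]
        rw [pvMergeFrom_absorb _ _ _ hc]
        exact ih pre (s ++ p) t (hts t (by simp)) (fun x hx => hts x (by simp [hx]))
      · have hA : (decide (p ≠ []) && (PySem.List.pyGet? p (-1) == some '.')) = false := by
          rw [hbridge]; simpa using hc
        rw [List.foldl_cons]
        simp only [hA, Bool.false_eq_true, if_false]
        rw [pvMergeFrom_stop _ _ _ (by simpa using hc)]
        have := ih (pre ++ [s ++ p]) [] t (hts t (by simp)) (fun x hx => hts x (by simp [hx]))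
        simp only [List.nil_append] at this
        rw [this]
        simp

lemma pvJoined_eq (words : List (List Char)) (h : ∀ t ∈ words, t ≠ []) :
    (words.foldl
      (fun (st : List (List Char) × List Char) word =>
        if decide (st.2 ≠ []) && (PySem.List.pyGet? st.2 (-1) == some '.') then
          (st.1.dropLast ++ [st.1.getLastD [] ++ word], word)
        else
          (st.1 ++ [word], word))
      ([], [])).1 = pvMerge words := by
  cases words with
  | nil => simp [pvMerge]
  | cons t ts =>
      rw [List.foldl_cons]
      have hinit : (decide (([] : List Char) ≠ []) &&
          (PySem.List.pyGet? ([] : List Char) (-1) == some '.')) = false := by simp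
      have hrest := pvFoldA ts [] [] t (h t (by simp)) (fun x hx => h x (by simp [hx]))
      simp only [List.nil_append] at hrest
      simp only [hinit, Bool.false_eq_true, if_false, List.nil_append]
      rw [hrest, pvMerge_cons]

-- B's fused loop = filter+map+count over the merged word list
lemma pvCountLoop_eq (stop : PySem.Set (List Char)) (ts : List (List Char)) :
    ∀ d, pvCountLoop stop ts d =
      (((pvMerge ts).filter (fun w =>
          decide (3 ≤ w.length) && !(stop.contains (PySem.Chars.lower w)))).map
        (fun w => PySem.Chars.lower w)).foldl
        (fun (d : PySem.Dict (List Char) Int) w => d.insert w (d.getD w 0 + 1)) d := by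
  induction ts using pvMerge.induct with
  | case1 => intro d; simp [pvCountLoop, pvMerge]
  | case2 t ts ih =>
      intro d
      rw [pvCountLoop, pvMerge_cons, pvMergeFrom]
      by_cases h : (decide (3 ≤ (pvAbsorb t ts).1.length) &&
          !(stop.contains (PySem.Chars.lower (pvAbsorb t ts).1))) = true
      · simp only [h, if_pos, List.filter_cons, List.map_cons, List.foldl_cons]
        exact ih _
      · have hf : (decide (3 ≤ (pvAbsorb t ts).1.length) &&
            !(stop.contains (PySem.Chars.lower (pvAbsorb t ts).1))) = false :=
          Bool.eq_false_iff.mpr h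
        simp only [hf, Bool.false_eq_true, if_false, List.filter_cons]
        exact ih _

-- A's membership-tested count step is B's insert/get step
lemma pvStepCount_eq :
    (fun (d : PySem.Dict (List Char) Int) w =>
      if d.contains w then d.modify w 0 (· + 1) else d.insert w 1) =
    (fun (d : PySem.Dict (List Char) Int) w => d.insert w (d.getD w 0 + 1)) := by
  funext d w
  by_cases h : d.contains w = true
  · simp [h, PySem.Dict.modify]
  · have h0 : d.getD w 0 = 0 := PySem.Dict.getD_of_not_contains d 0 (by simpa using h)
    simp [h, h0]

lemma pvStopContains (l : List (List Char)) (y : List Char) :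
    (PySem.Set.ofList l).contains y = l.contains y := by
  by_cases h : y ∈ l
  · simp [PySem.Set.contains, (PySem.Set.mem_ofList l y).mpr h, h]
  · simp [PySem.Set.contains, h]

-- ===== VERDICT (by name: the statement is the Claim_ definition above) =====
theorem process_review_spec : Claim_equal_process_review := by
  intro review _
  unfold Spec_process_review
  simp only [process_review, process_review_alt]
  rw [pvJoined_eq _ (pvSplit₀_ne_nil review.toList)]
  rw [pvStepCount_eq, pvCountLoop_eq]
  have hcond : (fun (w : List Char) =>
      decide (3 ≤ w.length) &&
        !((PySem.Set.ofList
            ["the".toList, "a".toList, "an".toList, "in".toList, "on".toList, "at".toList,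
             "to".toList, "for".toList, "with".toList, "by".toList, "of".toList, "is".toList,
             "are".toList, "was".toList, "were".toList]).contains (PySem.Chars.lower w))) =
      (fun (w : List Char) =>
      decide (3 ≤ w.length) &&
        !(List.contains
            ["the".toList, "a".toList, "an".toList, "in".toList, "on".toList, "at".toList,
             "to".toList, "for".toList, "with".toList, "by".toList, "of".toList, "is".toList,
             "are".toList, "was".toList, "were".toList] (PySem.Chars.lower w))) := by
    funext w
    rw [pvStopContains]
  rw [hcond]
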